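-- pv_equiv track=rewrite | github.com/mils8545/aoc2015python | 08/main.py | part2
-- ===== SOURCE A (Python) =====
-- def part2(lines):
--     totalExpandedChars = 0
--     totalPrintChars = 0
--     for line in lines:
--         expandedLine = line[1:-1]
--         expandedLine = expandedLine.replace("\\", "\\\\")
--         expandedLine = expandedLine.replace("\"", "\\\"")
--         expandedLine = "\"\\\"" + expandedLine +  "\\\"\""
--         totalExpandedChars += len(expandedLine)
--         totalPrintChars += len(line)
--     return(f"The difference in expanded and original charachters is {totalExpandedChars - totalPrintChars}.")
-- ===== SOURCE B (Python) =====
-- def _enc_diff(line):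
--     inner = line[1:-1]
--     return 6 + len(inner) + inner.count("\\") + inner.count("\"") - len(line)
--
-- def part2(lines):
--     diff = sum(map(_enc_diff, lines))
--     return(f"The difference in expanded and original charachters is {diff}.")
-- ===== Notes on version B (the rewrite author's own statement) =====
-- stated objective: simpler
-- what changed: Instead of building each escaped string with two .replace passes and quote-wrapping concatenation and taking its length, B computes each line's length difference arithmetically as 6 + len(inner) + inner.count('\') + inner.count('"') - len(line) and sums these per-line differences in one pass.
import Mathlib
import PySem

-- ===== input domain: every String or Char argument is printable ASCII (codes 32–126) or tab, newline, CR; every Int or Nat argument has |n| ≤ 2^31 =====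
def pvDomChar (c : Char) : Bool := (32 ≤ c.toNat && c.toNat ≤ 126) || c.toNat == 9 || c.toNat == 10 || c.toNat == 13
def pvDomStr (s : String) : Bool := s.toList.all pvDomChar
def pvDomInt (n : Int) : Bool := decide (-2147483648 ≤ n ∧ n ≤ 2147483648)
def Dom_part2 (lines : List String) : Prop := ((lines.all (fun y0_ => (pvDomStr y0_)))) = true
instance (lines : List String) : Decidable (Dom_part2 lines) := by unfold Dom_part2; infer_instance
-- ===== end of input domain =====

-- B replaces A's escaped-string construction (two .replace passes plus concatenation)
-- by direct arithmetic counting of the escapable characters (objective: simpler).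

-- ===== PORT A =====
def part2 (lines : List String) : String :=
  let acc := lines.foldl (fun (acc : Int × Int) line =>
    let expandedLine0 := PySem.Str.slice line (some 1) (some (-1))
    let expandedLine1 := PySem.Str.replace expandedLine0 "\\" "\\\\"
    let expandedLine2 := PySem.Str.replace expandedLine1 "\"" "\\\""
    let expandedLine3 := "\"\\\"" ++ expandedLine2 ++ "\\\"\""
    (acc.1 + PySem.Str.len expandedLine3, acc.2 + PySem.Str.len line)) (0, 0)
  "The difference in expanded and original charachters is " ++ PySem.Int.toStr (acc.1 - acc.2) ++ "."

-- ===== PORT B =====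
def pvEncDiff (line : String) : Int :=
  let inner := PySem.Str.slice line (some 1) (some (-1))
  6 + PySem.Str.len inner + (PySem.Str.count inner "\\" : Int) + (PySem.Str.count inner "\"" : Int)
    - PySem.Str.len line

def part2_alt (lines : List String) : String :=
  let diff := (lines.map pvEncDiff).sum
  "The difference in expanded and original charachters is " ++ PySem.Int.toStr diff ++ "."

-- ===== PRECONDITION & SPEC =====
def Spec_part2 (lines : List String) (out : String) : Prop := out = part2_alt lines
instance (lines : List String) (out : String) : Decidable (Spec_part2 lines out) := by unfold Spec_part2; infer_instance

-- ===== CLAIM (what is proved, stated in full; the proofs are below) =====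
def Claim_equal_part2 : Prop := ∀ (lines : List String), Dom_part2 lines → Spec_part2 lines (part2 lines)

-- ===== LEMMAS AND PROOFS =====

-- single-character replace is a flatMap (generalised over the fuel of the library's go)
theorem pv_replace_go_single (a : Char) (nl : List Char) :
    ∀ (fuel : Nat) (l acc : List Char), l.length ≤ fuel →
      PySem.Chars.replace.go [a] nl fuel l acc
        = acc.reverse ++ l.flatMap (fun c => if c = a then nl else [c]) := by
  intro fuel
  induction fuel with
  | zero =>
    intro l acc h
    have : l = [] := List.eq_nil_of_length_eq_zero (Nat.le_zero.mp h)
    subst this; simp [PySem.Chars.replace.go]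
  | succ n ih =>
    intro l acc h
    cases l with
    | nil => simp [PySem.Chars.replace.go]
    | cons c t =>
      simp only [PySem.Chars.replace.go, List.isPrefixOf, Bool.and_true]
      simp only [List.length_cons, Nat.succ_le_succ_iff] at h
      by_cases hc : a = c
      · subst hc
        simp only [BEq.rfl, if_true]
        rw [show List.drop ([a] : List Char).length (a :: t) = t from by simp]
        rw [ih t _ h]
        simp [List.flatMap_cons]
      · rw [if_neg (by simp [hc])]
        rw [ih t _ h]
        simp [List.flatMap_cons, Ne.symm hc]

theorem pv_replace_single (a : Char) (nl : List Char) (cs : List Char) :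
    PySem.Chars.replace cs [a] nl = cs.flatMap (fun c => if c = a then nl else [c]) := by
  have he : ([a] : List Char).isEmpty = false := rfl
  simp only [PySem.Chars.replace, he, Bool.false_eq_true, if_false]
  exact pv_replace_go_single a nl cs.length cs [] (le_refl _)

-- single-character count is countP (generalised over the fuel of the library's go)
theorem pv_count_go_single (a : Char) :
    ∀ (fuel : Nat) (l : List Char) (acc : Nat), l.length ≤ fuel →
      PySem.Chars.count.go [a] fuel l acc = acc + l.countP (fun c => c == a) := by
  intro fuel
  induction fuel with
  | zero =>
    intro l acc h
    have : l = [] := List.eq_nil_of_length_eq_zero (Nat.le_zero.mp h)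
    subst this; simp [PySem.Chars.count.go]
  | succ n ih =>
    intro l acc h
    cases l with
    | nil => simp [PySem.Chars.count.go]
    | cons c t =>
      simp only [PySem.Chars.count.go, List.isPrefixOf, Bool.and_true]
      simp only [List.length_cons, Nat.succ_le_succ_iff] at h
      by_cases hc : a = c
      · subst hc
        simp only [BEq.rfl, if_true]
        rw [show List.drop ([a] : List Char).length (a :: t) = t from by simp]
        rw [ih t _ h]
        rw [List.countP_cons]
        simp
        omega
      · rw [if_neg (by simp [hc])]
        rw [ih t _ h]
        simp [show (c == a) = false by simp [Ne.symm hc]]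

theorem pv_count_single (a : Char) (cs : List Char) :
    PySem.Chars.count cs [a] = cs.countP (fun c => c == a) := by
  have he : ([a] : List Char).isEmpty = false := rfl
  simp only [PySem.Chars.count, he, Bool.false_eq_true, if_false]
  simpa using pv_count_go_single a cs.length cs 0 (le_refl _)

-- the two chained single-char replaces grow the string by one per escapable character
theorem pv_escape_len (cs : List Char) :
    (PySem.Chars.replace (PySem.Chars.replace cs ['\\'] ['\\', '\\']) ['"'] ['\\', '"']).length
      = cs.length + cs.countP (fun c => c == '\\') + cs.countP (fun c => c == '"') := by
  rw [pv_replace_single, pv_replace_single]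
  induction cs with
  | nil => simp
  | cons c t ih =>
    rw [List.flatMap_cons, List.flatMap_append, List.length_append]
    rw [List.length_cons, List.countP_cons, List.countP_cons, ih]
    by_cases h1 : c = '\\'
    · subst h1; simp; omega
    · by_cases h2 : c = '"'
      · subst h2; simp; omega
      · simp [if_neg h1, if_neg h2, show (c == '\\') = false by simp [h1],
          show (c == '"') = false by simp [h2]]
        omega

-- per-line: the length of A's wrapped escaped string, minus the line length,
-- equals B's arithmetic count
theorem pv_line_diff (line : String) :
    PySem.Str.len ("\"\\\"" ++ PySem.Str.replace
        (PySem.Str.replace (PySem.Str.slice line (some 1) (some (-1))) "\\" "\\\\") "\"" "\\\""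
        ++ "\\\"\"") - PySem.Str.len line = pvEncDiff line := by
  set t := PySem.Str.slice line (some 1) (some (-1)) with ht
  simp only [pvEncDiff, PySem.Str.len_eq, PySem.Str.count_eq, PySem.Str.replace]
  rw [String.toList_append, String.toList_append]
  simp only [List.length_append, String.toList_ofList]
  rw [show ("\\" : String).toList = ['\\'] from rfl,
      show ("\\\\" : String).toList = ['\\', '\\'] from rfl,
      show ("\"" : String).toList = ['"'] from rfl,
      show ("\\\"" : String).toList = ['\\', '"'] from rfl,
      show ("\"\\\"" : String).toList.length = 3 from rfl,
      show ("\\\"\"" : String).toList.length = 3 from rfl]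
  rw [pv_escape_len t.toList, pv_count_single, pv_count_single, ← ht]
  push_cast
  ring

-- the fold of A computes, in its two accumulators, exactly B's summed difference
theorem pv_fold_diff (lines : List String) : ∀ (e p : Int),
    (lines.foldl (fun (acc : Int × Int) line =>
      let expandedLine0 := PySem.Str.slice line (some 1) (some (-1))
      let expandedLine1 := PySem.Str.replace expandedLine0 "\\" "\\\\"
      let expandedLine2 := PySem.Str.replace expandedLine1 "\"" "\\\""
      let expandedLine3 := "\"\\\"" ++ expandedLine2 ++ "\\\"\""
      (acc.1 + PySem.Str.len expandedLine3, acc.2 + PySem.Str.len line)) (e, p)).1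
    - (lines.foldl (fun (acc : Int × Int) line =>
      let expandedLine0 := PySem.Str.slice line (some 1) (some (-1))
      let expandedLine1 := PySem.Str.replace expandedLine0 "\\" "\\\\"
      let expandedLine2 := PySem.Str.replace expandedLine1 "\"" "\\\""
      let expandedLine3 := "\"\\\"" ++ expandedLine2 ++ "\\\"\""
      (acc.1 + PySem.Str.len expandedLine3, acc.2 + PySem.Str.len line)) (e, p)).2
    = e - p + (lines.map pvEncDiff).sum := by
  induction lines with
  | nil => intro e p; simp
  | cons line rest ih =>
    intro e p
    simp only [List.foldl_cons, List.map_cons, List.sum_cons]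
    rw [ih]
    have := pv_line_diff line
    omega

-- ===== VERDICT (by name: the statement is the Claim_ definition above) =====
theorem part2_spec : Claim_equal_part2 := by
  intro lines _
  unfold Spec_part2 part2 part2_alt
  have h := pv_fold_diff lines 0 0
  rw [show (0 : Int) - 0 + (lines.map pvEncDiff).sum = (lines.map pvEncDiff).sum by ring] at h
  exact congrArg (fun d => "The difference in expanded and original charachters is " ++ PySem.Int.toStr d ++ ".") h
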